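-- pv_equiv track=rewrite | github.com/chosaihim/jungle_codingTest_study | FEB/13th/조이스틱.py | solution
-- ===== SOURCE A (Python) =====
-- def changeAlphabet(x):
--     return min(ord(x)-65,91-ord(x))
--
-- def chooseAlphabet(string,index):
--     n = len(string)
--     if string[index]!='A':
--         return [index,0]
--     for i in range(1,1+n//2):
--         mi,pi = index-i,index+i
--
--         if index-i<0:  mi += n
--         if index+i>=n: pi -= n
--
--         if string[pi] != 'A':
--             return [pi, i]
--         elif string[mi] != 'A':
--             return [mi, i]
--     return [-1,-1]
--
-- def solution(string):
--     i = 0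
--     answer = 0
--     string = list(string)
--     while 1:
--         index, diff = chooseAlphabet(string, i)
--         if index == -1:
--             break
--         answer += diff
--         answer += changeAlphabet(string[index])
--         string[index] = 'A'
--         i = index
--
--     return answer
-- ===== SOURCE B (Python) =====
-- def changeAlphabet(x):
--     return min(ord(x) - 65, 91 - ord(x))
--
-- def solution(string):
--     n = len(string)
--     rem = [j for j in range(n) if string[j] != 'A']
--     answer = 0
--     i = 0
--     f, b = 0, len(rem) - 1
--     while f <= b:
--         fwd = (rem[f] - i) % n
--         bwd = (i - rem[b]) % n
--         if fwd <= bwd: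
--             i = rem[f]
--             f += 1
--             answer += fwd
--         else:
--             i = rem[b]
--             b -= 1
--             answer += bwd
--         answer += changeAlphabet(string[i])
--     return answer
-- ===== Notes on version B (the rewrite author's own statement) =====
-- stated objective: faster
-- what changed: Replaces A's repeated expanding ring scans over a mutated char list with a single two-pointer sweep over the precomputed sorted list of non-'A' indices (the greedy target is always the cyclic successor or predecessor of the current position, so each step is O(1) with no list mutation).
import Mathlib
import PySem

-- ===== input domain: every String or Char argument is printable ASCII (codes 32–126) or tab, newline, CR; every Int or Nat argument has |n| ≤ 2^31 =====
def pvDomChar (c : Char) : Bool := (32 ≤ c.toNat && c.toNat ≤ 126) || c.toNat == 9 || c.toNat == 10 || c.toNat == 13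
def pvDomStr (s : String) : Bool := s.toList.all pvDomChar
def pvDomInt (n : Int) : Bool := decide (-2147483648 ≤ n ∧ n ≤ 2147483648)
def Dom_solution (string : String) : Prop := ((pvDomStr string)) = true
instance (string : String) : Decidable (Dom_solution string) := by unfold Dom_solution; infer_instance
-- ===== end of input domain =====

-- B replaces A's per-step expanding ring scan over the mutated string with a one-pass
-- two-pointer sweep over the precomputed sorted list of non-'A' indices (objective: faster
-- worst case; equal return value proved for every nonempty string).

-- ===== PORT A =====
def changeAlphabet (x : Char) : Int := min ((x.toNat : Int) - 65) (91 - (x.toNat : Int))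

-- the scan `for i in range(1, 1+n//2)` of chooseAlphabet; all indices it reads are in
-- range (see the invariant lemmas below), where pyGetD is exact
def chooseScan (s : List Char) (index n : Int) : List Int → Int × Int
  | [] => (-1, -1)
  | i :: rest =>
    let mi := if index - i < 0 then index - i + n else index - i
    let pi := if index + i ≥ n then index + i - n else index + i
    if PySem.List.pyGetD s pi 'A' ≠ 'A' then (pi, i)
    else if PySem.List.pyGetD s mi 'A' ≠ 'A' then (mi, i)
    else chooseScan s index n rest

def chooseAlphabet (s : List Char) (index : Int) : Int × Int :=
  let n : Int := s.length
  if PySem.List.pyGetD s index 'A' ≠ 'A' then (index, 0)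
  else chooseScan s index n (PySem.List.pyRange 1 (1 + PySem.Int.floordiv n 2) 1)

-- the `while 1` loop; fuel = (number of non-'A' chars) + 1 is exactly enough (each
-- iteration before the break erases one non-'A' char), so the guard is never hit
def solutionLoopA : Nat → List Char → Int → Int → Int
  | 0, _, _, ans => ans
  | fuel + 1, s, i, ans =>
    let r := chooseAlphabet s i
    if r.1 = -1 then ans
    else solutionLoopA fuel (s.set r.1.toNat 'A') r.1
           (ans + r.2 + changeAlphabet (PySem.List.pyGetD s r.1 'A'))

def solution (string : String) : Int :=
  let s := string.toList
  solutionLoopA (s.countP (fun c => c ≠ 'A') + 1) s 0 0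

-- ===== PORT B =====
def loopB (n : Int) (t : List Char) (rem : List Int) : Nat → Int → Int → Int → Int → Int
  | 0, _, _, _, ans => ans
  | fuel + 1, f, b, i, ans =>
    if f ≤ b then
      let fwd := PySem.Int.mod (PySem.List.pyGetD rem f 0 - i) n
      let bwd := PySem.Int.mod (i - PySem.List.pyGetD rem b 0) n
      if fwd ≤ bwd then
        loopB n t rem fuel (f + 1) b (PySem.List.pyGetD rem f 0)
          (ans + fwd + changeAlphabet (PySem.List.pyGetD t (PySem.List.pyGetD rem f 0) 'A'))
      else
        loopB n t rem fuel f (b - 1) (PySem.List.pyGetD rem b 0)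
          (ans + bwd + changeAlphabet (PySem.List.pyGetD t (PySem.List.pyGetD rem b 0) 'A'))
    else ans

def solution_alt (string : String) : Int :=
  let t := string.toList
  let n : Int := t.length
  let rem : List Int :=
    (List.range t.length).filterMap (fun j => if t.getD j 'A' ≠ 'A' then some (j : Int) else none)
  loopB n t rem rem.length 0 ((rem.length : Int) - 1) 0 0

-- ===== PRECONDITION & SPEC =====
-- A indexes string[0] unconditionally, so it raises IndexError on the empty string.
def Pre_solution (string : String) : Prop := string ≠ ""
instance (string : String) : Decidable (Pre_solution string) := by unfold Pre_solution; infer_instance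

def pvWitness_solution : String := "BZA"

def Spec_solution (string : String) (out : Int) : Prop := out = solution_alt string
instance (string : String) (out : Int) : Decidable (Spec_solution string out) := by unfold Spec_solution; infer_instance

-- ===== CLAIM (what is proved, stated in full; the proofs are below) =====
def Claim_equal_solution : Prop := ∀ (string : String), Dom_solution string → Pre_solution string → Spec_solution string (solution string)

-- ===== LEMMAS AND PROOFS =====

def nonA (t : List Char) : List Int :=
  ((List.range t.length).filter (fun j => t.getD j 'A' ≠ 'A')).map (fun (j : Nat) => (j : Int))

def InWin (rem : List Int) (f b j : Int) : Prop :=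
  ∃ k : Nat, f ≤ (k : Int) ∧ (k : Int) ≤ b ∧ rem[k]? = some j

structure LoopInv (t s : List Char) (rem : List Int) (f b i : Int) : Prop where
  hs : s.length = t.length
  hrem : rem = nonA t
  hf : 0 ≤ f
  hb : b < (rem.length : Int)
  hi0 : 0 ≤ i
  hin : i < (t.length : Int)
  hchar : ∀ j : Nat, j < s.length → (s.getD j 'A' ≠ 'A' ↔ InWin rem f b (j : Int))
  hagree : ∀ j : Nat, j < s.length → InWin rem f b (j : Int) → s.getD j 'A' = t.getD j 'A'
  hpos : f ≤ b → (i ≤ PySem.List.pyGetD rem f 0 ∨ PySem.List.pyGetD rem b 0 < i)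

lemma filterMap_if {α β : Type} (p : α → Prop) [DecidablePred p] (g : α → β) :
    ∀ l : List α, l.filterMap (fun a => if p a then some (g a) else none)
      = (l.filter (fun a => decide (p a))).map g := by
  intro l
  induction l with
  | nil => rfl
  | cons a l ih =>
    simp only [List.filterMap_cons, List.filter_cons]
    by_cases h : p a
    · simp [h, ih]
    · simp [h, ih]

lemma nonA_eq (t : List Char) :
    (List.range t.length).filterMap (fun j => if t.getD j 'A' ≠ 'A' then some ((j : Int)) else none)
      = nonA t := by
  rw [filterMap_if (fun j => t.getD j 'A' ≠ 'A') (fun j => (j : Int))]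
  unfold nonA
  rfl

lemma nonA_sorted (t : List Char) : (nonA t).Pairwise (· < ·) := by
  unfold nonA
  refine List.pairwise_map.mpr ?_
  refine List.Pairwise.imp (fun {a b} h => ?_) (List.Pairwise.filter _ (List.pairwise_lt_range))
  exact_mod_cast h

lemma mem_nonA (t : List Char) (j : Int) :
    j ∈ nonA t ↔ ∃ jn : Nat, (jn : Int) = j ∧ jn < t.length ∧ t.getD jn 'A' ≠ 'A' := by
  unfold nonA
  simp only [List.mem_map, List.mem_filter, List.mem_range, decide_eq_true_eq]
  constructor
  · rintro ⟨jn, ⟨h1, h2⟩, h3⟩; exact ⟨jn, h3, h1, h2⟩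
  · rintro ⟨jn, h3, h1, h2⟩; exact ⟨jn, ⟨h1, h2⟩, h3⟩

lemma countP_eq (t : List Char) :
    t.countP (fun c => c ≠ 'A') = (nonA t).length := by
  unfold nonA
  rw [List.length_map, ← List.countP_eq_length_filter]
  induction t using List.reverseRecOn with
  | nil => rfl
  | append_singleton l c ih =>
    rw [List.countP_append, List.length_append, List.length_singleton, List.range_succ,
        List.countP_append, ih]
    congr 1
    · refine List.countP_congr (fun j hj => ?_)
      rw [List.mem_range] at hj
      rw [List.getD_append _ _ _ _ hj]
    · simp [List.countP_cons]

lemma nonA_lt (t : List Char) (k k' : Nat) (x y : Int) (hkk : k < k')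
    (hx : (nonA t)[k]? = some x) (hy : (nonA t)[k']? = some y) : x < y := by
  have hp := (List.pairwise_iff_getElem).mp (nonA_sorted t)
  obtain ⟨hx1, hx2⟩ := List.getElem?_eq_some_iff.mp hx
  obtain ⟨hy1, hy2⟩ := List.getElem?_eq_some_iff.mp hy
  have := hp k k' hx1 hy1 hkk
  rw [hx2, hy2] at this
  exact this

lemma emod_self_of_lt (a n : Int) (h0 : 0 ≤ a) (h : a < n) : a % n = a :=
  Int.emod_eq_of_lt h0 h

lemma emod_neg_of_lt (a n : Int) (h0 : -n < a) (h : a < 0) : a % n = a + n := by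
  have h1 := Int.emod_eq_of_lt (a := a + n) (b := n) (by omega) (by omega)
  have h2 : (a + n) % n = a % n := Int.add_emod_right a n
  omega

lemma pyGetD_allA (s : List Char) (h : ∀ c ∈ s, c = 'A') (x : Int) :
    PySem.List.pyGetD s x 'A' = 'A' := by
  cases hr : PySem.List.pyGet? s x with
  | none => exact PySem.List.pyGetD_of_none s x 'A' hr
  | some c =>
    have hc : c ∈ s := PySem.List.mem_of_pyGet?_eq_some s hr
    have : PySem.List.pyGetD s x 'A' = c := by
      unfold PySem.List.pyGetD
      rw [hr]; rfl
    rw [this]; exact h c hc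

lemma scan_allA (s : List Char) (i n : Int) (h : ∀ c ∈ s, c = 'A') :
    ∀ l : List Int, chooseScan s i n l = (-1, -1) := by
  intro l
  induction l with
  | nil => rfl
  | cons a l ih =>
    unfold chooseScan
    simp [pyGetD_allA s h, ih]

def wpos (i n d : Int) : Int := if i + d ≥ n then i + d - n else i + d
def wneg (i n d : Int) : Int := if i - d < 0 then i - d + n else i - d

lemma scan_finds (s : List Char) (i n dm : Int) (hn : n = (s.length : Int))
    (hi0 : 0 ≤ i) (hin : i < n) (hdm1 : 1 ≤ dm) (hdm2 : 2 * dm ≤ n)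
    (hhit : PySem.List.pyGetD s (wpos i n dm) 'A' ≠ 'A' ∨ PySem.List.pyGetD s (wneg i n dm) 'A' ≠ 'A')
    (hmiss : ∀ d : Int, 1 ≤ d → d < dm →
      PySem.List.pyGetD s (wpos i n d) 'A' = 'A' ∧ PySem.List.pyGetD s (wneg i n d) 'A' = 'A') :
    ∀ a : Int, 1 ≤ a → a ≤ dm →
      chooseScan s i n (PySem.List.pyRange a (1 + PySem.Int.floordiv n 2) 1)
        = if PySem.List.pyGetD s (wpos i n dm) 'A' ≠ 'A' then (wpos i n dm, dm) else (wneg i n dm, dm) := by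
  have hn0 : (0:Int) < n := by omega
  have hdiv : PySem.Int.floordiv n 2 = n / 2 := PySem.Int.floordiv_eq_ediv_of_pos (by norm_num)
  unfold wpos wneg at hhit hmiss ⊢
  have H : ∀ m : Nat, ∀ a : Int, 1 ≤ a → a ≤ dm → (dm - a).toNat = m →
      chooseScan s i n (PySem.List.pyRange a (1 + PySem.Int.floordiv n 2) 1)
        = if PySem.List.pyGetD s (if i + dm ≥ n then i + dm - n else i + dm) 'A' ≠ 'A'
          then ((if i + dm ≥ n then i + dm - n else i + dm), dm)
          else ((if i - dm < 0 then i - dm + n else i - dm), dm) := by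
    intro m
    induction m using Nat.strong_induction_on with
    | _ m ih =>
      intro a ha1 ha2 hm
      rw [PySem.List.pyRange_one_cons (show a < 1 + PySem.Int.floordiv n 2 by omega)]
      by_cases hlt : a < dm
      · obtain ⟨h1, h2⟩ := hmiss a (by omega) hlt
        simp only [chooseScan, h1, h2, ne_eq, not_true_eq_false, if_false]
        exact ih (dm - (a+1)).toNat (by omega) (a+1) (by omega) (by omega) rfl
      · have ha : a = dm := by omega
        subst ha
        by_cases hF : PySem.List.pyGetD s (if i + a ≥ n then i + a - n else i + a) 'A' ≠ 'A'
        · simp only [chooseScan]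
          simp [hF]
        · have hB : PySem.List.pyGetD s (if i - a < 0 then i - a + n else i - a) 'A' ≠ 'A' :=
            hhit.resolve_left hF
          simp only [chooseScan]
          rw [if_neg hF, if_neg hF, if_pos hB]
  intro a ha1 ha2
  exact H (dm - a).toNat a ha1 ha2 rfl

lemma pyGetD_bridge (s : List Char) (x : Int) (h0 : 0 ≤ x) (h1 : x < (s.length : Int)) :
    PySem.List.pyGetD s x 'A' = s.getD x.toNat 'A' := by
  rw [PySem.List.pyGetD_eq_getElem s 'A' h0 h1, List.getD_eq_getElem s 'A' (by omega)]

lemma nonA_le (t : List Char) (k k' : Nat) (x y : Int) (hkk : k ≤ k')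
    (hx : (nonA t)[k]? = some x) (hy : (nonA t)[k']? = some y) : x ≤ y := by
  rcases Nat.lt_or_ge k k' with h | h
  · exact le_of_lt (nonA_lt t k k' x y h hx hy)
  · have : k = k' := by omega
    subst this
    rw [hx] at hy
    simp_all

lemma mem_of_idx {rem : List Int} {k : Nat} {x : Int} (h : rem[k]? = some x) : x ∈ rem := by
  obtain ⟨h1, h2⟩ := List.getElem?_eq_some_iff.mp h
  exact h2 ▸ List.getElem_mem h1

lemma choose_eq (t s : List Char) (rem : List Int) (f b i : Int)
    (hInv : LoopInv t s rem f b i) (hfb : f ≤ b) :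
    chooseAlphabet s i =
      (if (PySem.List.pyGetD rem f 0 - i) % (t.length : Int) ≤ (i - PySem.List.pyGetD rem b 0) % (t.length : Int)
       then (PySem.List.pyGetD rem f 0, (PySem.List.pyGetD rem f 0 - i) % (t.length : Int))
       else (PySem.List.pyGetD rem b 0, (i - PySem.List.pyGetD rem b 0) % (t.length : Int))) := by
  obtain ⟨hs, hrem, hf, hb, hi0, hin, hchar, hagree, hpos⟩ := hInv
  subst hrem
  have hb0 : 0 ≤ b := le_trans hf hfb
  have hflt : f.toNat < (nonA t).length := by omega
  have hblt : b.toNat < (nonA t).length := by omega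
  have hFval : PySem.List.pyGetD (nonA t) f 0 = (nonA t)[f.toNat] :=
    PySem.List.pyGetD_eq_getElem _ _ hf (by omega)
  have hPval : PySem.List.pyGetD (nonA t) b 0 = (nonA t)[b.toNat] :=
    PySem.List.pyGetD_eq_getElem _ _ hb0 (by omega)
  set F := PySem.List.pyGetD (nonA t) f 0 with hFdef
  set P := PySem.List.pyGetD (nonA t) b 0 with hPdef
  have hFidx : (nonA t)[f.toNat]? = some F := by rw [hFval]; exact List.getElem?_eq_getElem hflt
  have hPidx : (nonA t)[b.toNat]? = some P := by rw [hPval]; exact List.getElem?_eq_getElem hblt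
  have hFwin : InWin (nonA t) f b F := ⟨f.toNat, by omega, by omega, hFidx⟩
  have hPwin : InWin (nonA t) f b P := ⟨b.toNat, by omega, by omega, hPidx⟩
  have hwin : ∀ j, InWin (nonA t) f b j →
      F ≤ j ∧ j ≤ P ∧ 0 ≤ j ∧ j < (t.length : Int) ∧ t.getD j.toNat 'A' ≠ 'A' := by
    intro j hj
    obtain ⟨k, hk1, hk2, hk3⟩ := hj
    have hkl : k < (nonA t).length := (List.getElem?_eq_some_iff.mp hk3).1
    have h1 : F ≤ j := nonA_le t f.toNat k F j (by omega) hFidx hk3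
    have h2 : j ≤ P := nonA_le t k b.toNat j P (by omega) hk3 hPidx
    obtain ⟨jn, hjn1, hjn2, hjn3⟩ := (mem_nonA t j).mp (mem_of_idx hk3)
    refine ⟨h1, h2, by omega, by omega, ?_⟩
    have hjeq : j.toNat = jn := by omega
    rw [hjeq]; exact hjn3
  have hF0 : 0 ≤ F := (hwin F hFwin).2.2.1
  have hFn : F < (t.length : Int) := (hwin F hFwin).2.2.2.1
  have hP0 : 0 ≤ P := (hwin P hPwin).2.2.1
  have hPn : P < (t.length : Int) := (hwin P hPwin).2.2.2.1
  have hFP : F ≤ P := (hwin F hFwin).2.1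
  have hn0 : (0 : Int) < (t.length : Int) := by omega
  have hcharI : ∀ x : Int, 0 ≤ x → x < (t.length : Int) →
      (PySem.List.pyGetD s x 'A' ≠ 'A' ↔ InWin (nonA t) f b x) := by
    intro x h0 h1
    rw [pyGetD_bridge s x h0 (by omega)]
    have hx : x.toNat < s.length := by omega
    have hcc := hchar x.toNat hx
    rwa [show ((x.toNat : Int)) = x by omega] at hcc
  unfold chooseAlphabet
  simp only [hs]
  by_cases hiw : InWin (nonA t) f b i
  · have hiF : i = F := by
      have h1 := (hwin i hiw).1
      have h2 := (hwin i hiw).2.1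
      rcases hpos hfb with h | h <;> omega
    have hsi : PySem.List.pyGetD s i 'A' ≠ 'A' := (hcharI i hi0 hin).mpr hiw
    rw [if_pos hsi]
    have hz : (F - i) % (t.length : Int) = 0 := by rw [← hiF]; simp
    rw [hz, if_pos (Int.emod_nonneg _ (by omega))]
    rw [hiF]
  · have hsi : ¬ PySem.List.pyGetD s i 'A' ≠ 'A' := by
      intro hcon; exact hiw ((hcharI i hi0 hin).mp hcon)
    rw [if_neg hsi]
    have hFne : F ≠ i := fun h => hiw (h ▸ hFwin)
    have hPne : P ≠ i := fun h => hiw (h ▸ hPwin)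
    have hwp_mod : ∀ d : Int, 1 ≤ d → d < (t.length : Int) →
        (wpos i (t.length : Int) d - i) % (t.length : Int) = d := by
      intro d h1 h2
      unfold wpos
      split
      · rw [show i + d - (t.length : Int) - i = d - (t.length : Int) by ring]
        rw [show (d - (t.length : Int)) % (t.length : Int)
              = ((d - (t.length : Int)) + (t.length : Int)) % (t.length : Int)
            from (Int.add_emod_right _ _).symm]
        rw [show d - (t.length : Int) + (t.length : Int) = d by ring]
        exact emod_self_of_lt d _ (by omega) (by omega)
      · rw [show i + d - i = d by ring]
        exact emod_self_of_lt d _ (by omega) (by omega)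
    have hwn_mod : ∀ d : Int, 1 ≤ d → d < (t.length : Int) →
        (i - wneg i (t.length : Int) d) % (t.length : Int) = d := by
      intro d h1 h2
      unfold wneg
      split
      · rw [show i - (i - d + (t.length : Int)) = d - (t.length : Int) by ring]
        rw [show (d - (t.length : Int)) % (t.length : Int)
              = ((d - (t.length : Int)) + (t.length : Int)) % (t.length : Int)
            from (Int.add_emod_right _ _).symm]
        rw [show d - (t.length : Int) + (t.length : Int) = d by ring]
        exact emod_self_of_lt d _ (by omega) (by omega)
      · rw [show i - (i - d) = d by ring]
        exact emod_self_of_lt d _ (by omega) (by omega)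
    have hsF : PySem.List.pyGetD s F 'A' ≠ 'A' := (hcharI F hF0 hFn).mpr hFwin
    have hsP : PySem.List.pyGetD s P 'A' ≠ 'A' := (hcharI P hP0 hPn).mpr hPwin
    have main : ∀ fv bv : Int,
        (F - i) % (t.length : Int) = fv → (i - P) % (t.length : Int) = bv →
        1 ≤ fv → 1 ≤ bv → fv + bv ≤ (t.length : Int) →
        wpos i (t.length : Int) fv = F → wneg i (t.length : Int) bv = P →
        (∀ j, InWin (nonA t) f b j →
          fv ≤ (j - i) % (t.length : Int) ∧ bv ≤ (i - j) % (t.length : Int)) →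
        chooseScan s i (t.length : Int)
            (PySem.List.pyRange 1 (1 + PySem.Int.floordiv (t.length : Int) 2) 1)
          = if (F - i) % (t.length : Int) ≤ (i - P) % (t.length : Int)
            then (F, (F - i) % (t.length : Int)) else (P, (i - P) % (t.length : Int)) := by
      intro fv bv hfv hbv hfv1 hbv1 hsum hwpF hwnP hle
      have hmiss : ∀ d : Int, 1 ≤ d → d < fv → d < bv →
          PySem.List.pyGetD s (wpos i (t.length : Int) d) 'A' = 'A' ∧
          PySem.List.pyGetD s (wneg i (t.length : Int) d) 'A' = 'A' := by
        intro d hd1 hd2 hd3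
        constructor
        · by_contra hcon
          have hx0 : 0 ≤ wpos i (t.length : Int) d := by unfold wpos; split <;> omega
          have hx1 : wpos i (t.length : Int) d < (t.length : Int) := by unfold wpos; split <;> omega
          have h1 := (hle _ ((hcharI _ hx0 hx1).mp hcon)).1
          rw [hwp_mod d hd1 (by omega)] at h1
          omega
        · by_contra hcon
          have hx0 : 0 ≤ wneg i (t.length : Int) d := by unfold wneg; split <;> omega
          have hx1 : wneg i (t.length : Int) d < (t.length : Int) := by unfold wneg; split <;> omega
          have h1 := (hle _ ((hcharI _ hx0 hx1).mp hcon)).2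
          rw [hwn_mod d hd1 (by omega)] at h1
          omega
      by_cases hmin : fv ≤ bv
      · have hscan := scan_finds s i (t.length : Int) fv (by rw [hs]) hi0 hin hfv1 (by omega)
          (by rw [hwpF]; exact Or.inl hsF)
          (fun d h1 h2 => hmiss d h1 h2 (by omega))
          1 (by norm_num) (by omega)
        rw [hscan, hwpF, if_pos hsF, hfv, hbv, if_pos (by omega)]
      · have hbfv : bv < fv := by omega
        have hnotF : ¬ PySem.List.pyGetD s (wpos i (t.length : Int) bv) 'A' ≠ 'A' := by
          intro hcon
          have hx0 : 0 ≤ wpos i (t.length : Int) bv := by unfold wpos; split <;> omega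
          have hx1 : wpos i (t.length : Int) bv < (t.length : Int) := by unfold wpos; split <;> omega
          have h1 := (hle _ ((hcharI _ hx0 hx1).mp hcon)).1
          rw [hwp_mod bv hbv1 (by omega)] at h1
          omega
        have hscan := scan_finds s i (t.length : Int) bv (by rw [hs]) hi0 hin hbv1 (by omega)
          (by rw [hwnP]; exact Or.inr hsP)
          (fun d h1 h2 => hmiss d h1 (by omega) h2)
          1 (by norm_num) (by omega)
        rw [hscan, if_neg hnotF, hwnP, hfv, hbv, if_neg (by omega)]
    rcases hpos hfb with hL | hR
    · have hiF : i < F := by omega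
      have hiP : i < P := by omega
      refine main (F - i) (i - P + (t.length : Int)) ?_ ?_ (by omega) (by omega) (by omega) ?_ ?_ ?_
      · exact emod_self_of_lt _ _ (by omega) (by omega)
      · exact emod_neg_of_lt _ _ (by omega) (by omega)
      · unfold wpos; rw [if_neg (by omega)]; ring
      · unfold wneg; rw [if_pos (by omega)]; ring
      · intro j hj
        obtain ⟨h1, h2, h3, h4, _⟩ := hwin j hj
        have hji : j ≠ i := fun h => hiw (h ▸ hj)
        constructor
        · rw [emod_self_of_lt _ _ (by omega) (by omega)]; omega
        · rw [emod_neg_of_lt _ _ (by omega) (by omega)]; omega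
    · have hiP : P < i := hR
      have hiF : F < i := by omega
      refine main (F - i + (t.length : Int)) (i - P) ?_ ?_ (by omega) (by omega) (by omega) ?_ ?_ ?_
      · exact emod_neg_of_lt _ _ (by omega) (by omega)
      · exact emod_self_of_lt _ _ (by omega) (by omega)
      · unfold wpos; rw [if_pos (by omega)]; ring
      · unfold wneg; rw [if_neg (by omega)]; ring
      · intro j hj
        obtain ⟨h1, h2, h3, h4, _⟩ := hwin j hj
        have hji : j ≠ i := fun h => hiw (h ▸ hj)
        constructor
        · rw [emod_neg_of_lt _ _ (by omega) (by omega)]; omega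
        · rw [emod_self_of_lt _ _ (by omega) (by omega)]; omega

lemma idxF (t : List Char) (f b : Int) (hf : 0 ≤ f) (hfb : f ≤ b) (hb : b < ((nonA t).length : Int)) :
    (nonA t)[f.toNat]? = some (PySem.List.pyGetD (nonA t) f 0) := by
  have hflt : f.toNat < (nonA t).length := by omega
  rw [PySem.List.pyGetD_eq_getElem _ _ hf (by omega)]
  exact List.getElem?_eq_getElem hflt

lemma idxB (t : List Char) (f b : Int) (hf : 0 ≤ f) (hfb : f ≤ b) (hb : b < ((nonA t).length : Int)) :
    (nonA t)[b.toNat]? = some (PySem.List.pyGetD (nonA t) b 0) := by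
  have hb0 : 0 ≤ b := le_trans hf hfb
  have hblt : b.toNat < (nonA t).length := by omega
  rw [PySem.List.pyGetD_eq_getElem _ _ hb0 (by omega)]
  exact List.getElem?_eq_getElem hblt

lemma nonA_bounds (t : List Char) (j : Int) (h : j ∈ nonA t) :
    0 ≤ j ∧ j < (t.length : Int) := by
  obtain ⟨jn, h1, h2, _⟩ := (mem_nonA t j).mp h
  omega

lemma cost_eqF (t s : List Char) (rem : List Int) (f b i : Int)
    (hInv : LoopInv t s rem f b i) (hfb : f ≤ b) :
    PySem.List.pyGetD s (PySem.List.pyGetD rem f 0) 'A'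
      = PySem.List.pyGetD t (PySem.List.pyGetD rem f 0) 'A' := by
  obtain ⟨hs, hrem, hf, hb, hi0, hin, hchar, hagree, hpos⟩ := hInv
  subst hrem
  have hFidx := idxF t f b hf hfb hb
  have hFb := nonA_bounds t _ (mem_of_idx hFidx)
  have hFwin : InWin (nonA t) f b (PySem.List.pyGetD (nonA t) f 0) := ⟨f.toNat, by omega, by omega, hFidx⟩
  have hag := hagree (PySem.List.pyGetD (nonA t) f 0).toNat (by omega)
    (by rwa [show (((PySem.List.pyGetD (nonA t) f 0).toNat : Int)) = PySem.List.pyGetD (nonA t) f 0 by omega])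
  rw [pyGetD_bridge s _ (by omega) (by omega), pyGetD_bridge t _ (by omega) (by omega)]
  exact hag

lemma cost_eqB (t s : List Char) (rem : List Int) (f b i : Int)
    (hInv : LoopInv t s rem f b i) (hfb : f ≤ b) :
    PySem.List.pyGetD s (PySem.List.pyGetD rem b 0) 'A'
      = PySem.List.pyGetD t (PySem.List.pyGetD rem b 0) 'A' := by
  obtain ⟨hs, hrem, hf, hb, hi0, hin, hchar, hagree, hpos⟩ := hInv
  subst hrem
  have hPidx := idxB t f b hf hfb hb
  have hPb := nonA_bounds t _ (mem_of_idx hPidx)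
  have hPwin : InWin (nonA t) f b (PySem.List.pyGetD (nonA t) b 0) := ⟨b.toNat, by omega, by omega, hPidx⟩
  have hag := hagree (PySem.List.pyGetD (nonA t) b 0).toNat (by omega)
    (by rwa [show (((PySem.List.pyGetD (nonA t) b 0).toNat : Int)) = PySem.List.pyGetD (nonA t) b 0 by omega])
  rw [pyGetD_bridge s _ (by omega) (by omega), pyGetD_bridge t _ (by omega) (by omega)]
  exact hag

lemma Inv_stepF (t s : List Char) (rem : List Int) (f b i : Int)
    (hInv : LoopInv t s rem f b i) (hfb : f ≤ b) :
    LoopInv t (s.set (PySem.List.pyGetD rem f 0).toNat 'A') rem (f + 1) b (PySem.List.pyGetD rem f 0) := by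
  obtain ⟨hs, hrem, hf, hb, hi0, hin, hchar, hagree, hpos⟩ := hInv
  subst hrem
  have hFidx := idxF t f b hf hfb hb
  set F := PySem.List.pyGetD (nonA t) f 0 with hFdef
  have hFb := nonA_bounds t F (mem_of_idx hFidx)
  have hwin_gtF : ∀ j, InWin (nonA t) (f + 1) b j → F < j := by
    rintro j ⟨k, hk1, hk2, hk3⟩
    exact nonA_lt t f.toNat k F j (by omega) hFidx hk3
  have hwinFb : ∀ j, InWin (nonA t) (f + 1) b j → InWin (nonA t) f b j := by
    rintro j ⟨k, hk1, hk2, hk3⟩; exact ⟨k, by omega, hk2, hk3⟩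
  have hset : ∀ j : Nat, j < s.length →
      (s.set F.toNat 'A').getD j 'A' = if F.toNat = j then 'A' else s.getD j 'A' := by
    intro j hj
    by_cases hej : F.toNat = j
    · simp [List.getD_eq_getElem?_getD, hej, show j < s.length from hj]
    · simp [List.getD_eq_getElem?_getD, hej]
  refine ⟨by rw [List.length_set]; exact hs, rfl, by omega, hb, by omega, by omega, ?_, ?_, ?_⟩
  · intro j hj
    rw [List.length_set] at hj
    rw [hset j hj]
    by_cases hej : F.toNat = j
    · rw [if_pos hej]
      refine iff_of_false (by simp) (fun hcon => ?_)
      have := hwin_gtF _ hcon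
      omega
    · rw [if_neg hej]
      rw [hchar j hj]
      constructor
      · rintro ⟨k, hk1, hk2, hk3⟩
        refine ⟨k, ?_, hk2, hk3⟩
        by_contra hcon
        have hkeq : k = f.toNat := by omega
        rw [hkeq, hFidx] at hk3
        have : F = (j : Int) := by injection hk3
        omega
      · exact hwinFb _
  · intro j hj hjw
    rw [List.length_set] at hj
    rw [hset j hj]
    have hgt := hwin_gtF _ hjw
    rw [if_neg (by omega : ¬ F.toNat = j)]
    exact hagree j hj (hwinFb _ hjw)
  · intro hfb2
    left
    have hidx2 := idxF t (f + 1) b (by omega) hfb2 hb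
    have hlt := nonA_lt t f.toNat (f + 1).toNat F (PySem.List.pyGetD (nonA t) (f + 1) 0)
      (by omega) hFidx hidx2
    omega

lemma Inv_stepB (t s : List Char) (rem : List Int) (f b i : Int)
    (hInv : LoopInv t s rem f b i) (hfb : f ≤ b) :
    LoopInv t (s.set (PySem.List.pyGetD rem b 0).toNat 'A') rem f (b - 1) (PySem.List.pyGetD rem b 0) := by
  obtain ⟨hs, hrem, hf, hb, hi0, hin, hchar, hagree, hpos⟩ := hInv
  subst hrem
  have hPidx := idxB t f b hf hfb hb
  set P := PySem.List.pyGetD (nonA t) b 0 with hPdef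
  have hPb := nonA_bounds t P (mem_of_idx hPidx)
  have hwin_ltP : ∀ j, InWin (nonA t) f (b - 1) j → j < P := by
    rintro j ⟨k, hk1, hk2, hk3⟩
    exact nonA_lt t k b.toNat j P (by omega) hk3 hPidx
  have hwinPb : ∀ j, InWin (nonA t) f (b - 1) j → InWin (nonA t) f b j := by
    rintro j ⟨k, hk1, hk2, hk3⟩; exact ⟨k, hk1, by omega, hk3⟩
  have hset : ∀ j : Nat, j < s.length →
      (s.set P.toNat 'A').getD j 'A' = if P.toNat = j then 'A' else s.getD j 'A' := by
    intro j hj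
    by_cases hej : P.toNat = j
    · simp [List.getD_eq_getElem?_getD, hej, show j < s.length from hj]
    · simp [List.getD_eq_getElem?_getD, hej]
  refine ⟨by rw [List.length_set]; exact hs, rfl, hf, by omega, by omega, by omega, ?_, ?_, ?_⟩
  · intro j hj
    rw [List.length_set] at hj
    rw [hset j hj]
    by_cases hej : P.toNat = j
    · rw [if_pos hej]
      refine iff_of_false (by simp) (fun hcon => ?_)
      have := hwin_ltP _ hcon
      omega
    · rw [if_neg hej]
      rw [hchar j hj]
      constructor
      · rintro ⟨k, hk1, hk2, hk3⟩
        refine ⟨k, hk1, ?_, hk3⟩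
        by_contra hcon
        have hkeq : k = b.toNat := by omega
        rw [hkeq, hPidx] at hk3
        have : P = (j : Int) := by injection hk3
        omega
      · exact hwinPb _
  · intro j hj hjw
    rw [List.length_set] at hj
    rw [hset j hj]
    have hgt := hwin_ltP _ hjw
    rw [if_neg (by omega : ¬ P.toNat = j)]
    exact hagree j hj (hwinPb _ hjw)
  · intro hfb2
    right
    have hidx2 := idxB t f (b - 1) hf hfb2 (by omega)
    have hlt := nonA_lt t (b - 1).toNat b.toNat (PySem.List.pyGetD (nonA t) (b - 1) 0) P
      (by omega) hidx2 hPidx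
    omega

lemma loop_eq (t : List Char) : ∀ (w : Nat) (s : List Char) (rem : List Int) (f b i ans : Int),
    LoopInv t s rem f b i → (b + 1 - f).toNat = w →
    solutionLoopA (w + 1) s i ans = loopB (t.length : Int) t rem w f b i ans := by
  intro w
  induction w with
  | zero =>
    intro s rem f b i ans hInv hw
    obtain ⟨hs, hrem, hf, hb, hi0, hin, hchar, hagree, hpos⟩ := hInv
    have hallA : ∀ c ∈ s, c = 'A' := by
      intro c hc
      obtain ⟨j, hj⟩ := List.mem_iff_getElem?.mp hc
      have hjl : j < s.length := (List.getElem?_eq_some_iff.mp hj).1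
      by_contra hcon
      have hgd : s.getD j 'A' = c := by
        rw [List.getD_eq_getElem?_getD, hj]; rfl
      obtain ⟨k, hk1, hk2, _⟩ := (hchar j hjl).mp (by rw [hgd]; exact hcon)
      omega
    have h1 : PySem.List.pyGetD s i 'A' = 'A' := pyGetD_allA s hallA i
    have hch : chooseAlphabet s i = (-1, -1) := by
      unfold chooseAlphabet
      rw [if_neg (by simp [h1])]
      exact scan_allA s i _ hallA _
    simp [solutionLoopA, loopB, hch]
  | succ w ih =>
    intro s rem f b i ans hInv hw
    have hfb : f ≤ b := by omega
    have hch := choose_eq t s rem f b i hInv hfb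
    have hrem := hInv.hrem
    have hFb : 0 ≤ PySem.List.pyGetD rem f 0 ∧ PySem.List.pyGetD rem f 0 < (t.length : Int) := by
      rw [hrem]
      exact nonA_bounds t _ (mem_of_idx (idxF t f b hInv.hf hfb (by rw [← hrem]; exact hInv.hb)))
    have hPb : 0 ≤ PySem.List.pyGetD rem b 0 ∧ PySem.List.pyGetD rem b 0 < (t.length : Int) := by
      rw [hrem]
      exact nonA_bounds t _ (mem_of_idx (idxB t f b hInv.hf hfb (by rw [← hrem]; exact hInv.hb)))
    have hn0 : (0:Int) < (t.length : Int) := by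
      have h1 := hInv.hin; have h2 := hInv.hi0; omega
    simp only [solutionLoopA, loopB, hch]
    rw [if_pos hfb]
    rw [PySem.Int.mod_eq_emod_of_pos hn0, PySem.Int.mod_eq_emod_of_pos hn0]
    by_cases hdir : (PySem.List.pyGetD rem f 0 - i) % (t.length : Int)
        ≤ (i - PySem.List.pyGetD rem b 0) % (t.length : Int)
    · rw [if_pos hdir, if_pos hdir]
      rw [if_neg (show ¬ (PySem.List.pyGetD rem f 0,
          (PySem.List.pyGetD rem f 0 - i) % (t.length : Int)).1 = -1 by simp; omega)]
      rw [cost_eqF t s rem f b i hInv hfb]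
      exact ih _ rem (f + 1) b _ _ (Inv_stepF t s rem f b i hInv hfb) (by omega)
    · rw [if_neg hdir, if_neg hdir]
      rw [if_neg (show ¬ (PySem.List.pyGetD rem b 0,
          (i - PySem.List.pyGetD rem b 0) % (t.length : Int)).1 = -1 by simp; omega)]
      rw [cost_eqB t s rem f b i hInv hfb]
      exact ih _ rem f (b - 1) _ _ (Inv_stepB t s rem f b i hInv hfb) (by omega)

lemma Inv_init (t : List Char) (ht : t ≠ []) :
    LoopInv t t (nonA t) 0 (((nonA t).length : Int) - 1) 0 := by
  have hlen : 0 < t.length := List.length_pos_iff.mpr ht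
  refine ⟨rfl, rfl, le_refl 0, by omega, le_refl 0, by omega, ?_, ?_, ?_⟩
  · intro j hj
    constructor
    · intro hne
      have hmem : (j : Int) ∈ nonA t := (mem_nonA t j).mpr ⟨j, rfl, hj, hne⟩
      obtain ⟨k, hk⟩ := List.mem_iff_getElem?.mp hmem
      have hkl : k < (nonA t).length := (List.getElem?_eq_some_iff.mp hk).1
      exact ⟨k, by omega, by omega, hk⟩
    · rintro ⟨k, hk1, hk2, hk3⟩
      obtain ⟨jn, hjn1, hjn2, hjn3⟩ := (mem_nonA t _).mp (mem_of_idx hk3)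
      have : jn = j := by omega
      rw [← this]
      exact hjn3
  · intro j _ _
    rfl
  · intro hfb
    left
    have hidx := idxF t 0 (((nonA t).length : Int) - 1) (le_refl 0) hfb (by omega)
    have := (nonA_bounds t _ (mem_of_idx hidx)).1
    omega

-- ===== VERDICT (by name: the statement is the Claim_ definition above) =====
theorem solution_spec : Claim_equal_solution := by
  intro str _ hpre
  unfold Spec_solution solution solution_alt
  have ht : str.toList ≠ [] := by
    intro hnil
    exact hpre (String.toList_eq_nil_iff.mp hnil)
  simp only [nonA_eq, countP_eq]
  exact loop_eq str.toList (nonA str.toList).length str.toList (nonA str.toList) 0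
    (((nonA str.toList).length : Int) - 1) 0 0 (Inv_init _ ht) (by omega)
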